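-- pv_equiv track=rewrite | github.com/MartacusMaximus/hexmaprandomencounter | Assets/Editor/MythicBastionlandPdfParser.py | split_top_level_items
-- ===== SOURCE A (Python) =====
-- def split_top_level_items(text: str) -> list[str]:
--     if text.count("(") < 2:
--         return [text.strip()] if text.strip() else []
--
--     parts = []
--     current = []
--     depth = 0
--     index = 0
--
--     while index < len(text):
--         char = text[index]
--         if char == "(":
--             depth += 1
--         elif char == ")" and depth > 0:
--             depth -= 1
--
--         if depth == 0 and text.startswith(" and ", index):
--             fragment = "".join(current).strip()
--             if fragment:
--                 parts.append(fragment)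
--             current = []
--             index += 5
--             continue
--
--         current.append(char)
--         index += 1
--
--     tail = "".join(current).strip()
--     if tail:
--         parts.append(tail)
--     return parts
-- ===== SOURCE B (Python) =====
-- def split_top_level_items(text: str) -> list[str]:
--     if text.count("(") < 2:
--         return [text.strip()] if text.strip() else []
--
--     parts = []
--     chunk = []
--     depth = 0
--     for piece in text.split(" and "):
--         chunk.append(piece)
--         for ch in piece:
--             if ch == "(":
--                 depth += 1
--             elif ch == ")" and depth > 0:
--                 depth -= 1
--         if depth == 0:
--             fragment = " and ".join(chunk).strip()
--             if fragment:
--                 parts.append(fragment)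
--             chunk = []
--     if chunk:
--         tail = " and ".join(chunk).strip()
--         if tail:
--             parts.append(tail)
--     return parts
-- ===== Notes on version B (the rewrite author's own statement) =====
-- stated objective: alternative
-- what changed: A scans character by character with a per-index startswith(' and ') test and a growing character buffer; B instead calls text.split(' and ') once and merges the resulting pieces, folding the clamped paren depth over each piece and re-joining pending pieces with ' and ' only when a flush happens at depth 0.
import Mathlib
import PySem

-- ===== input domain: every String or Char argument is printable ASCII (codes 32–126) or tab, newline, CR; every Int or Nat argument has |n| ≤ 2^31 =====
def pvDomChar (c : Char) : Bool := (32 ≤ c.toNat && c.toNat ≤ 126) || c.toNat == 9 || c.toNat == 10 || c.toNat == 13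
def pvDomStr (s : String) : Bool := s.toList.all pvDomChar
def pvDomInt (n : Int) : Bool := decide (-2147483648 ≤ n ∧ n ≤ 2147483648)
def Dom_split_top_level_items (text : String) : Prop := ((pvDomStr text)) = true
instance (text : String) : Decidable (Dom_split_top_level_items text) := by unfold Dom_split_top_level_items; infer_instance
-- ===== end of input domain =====

-- B replaces A's one-character-at-a-time scan (with its per-index startswith test) by split(" and ")
-- followed by a merge of the pieces under a per-piece paren-depth fold; proved to return exactly
-- A's value on every input.

-- the separator " and " as a list of characters (both Pythons contain this literal)
def pvSep : List Char := [' ', 'a', 'n', 'd', ' ']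

-- the paren-depth update for one character (the identical if/elif lines of both Pythons)
def pvStepD (depth : Nat) (c : Char) : Nat :=
  if c = '(' then depth + 1
  else if c = ')' ∧ depth > 0 then depth - 1
  else depth

-- ===== PORT A =====
-- A's while loop: the remaining suffix text[index:] is the first argument
def pvA_loop : List Char → List String → List Char → Nat → List String
  | [], parts, current, _ =>
      let tail := PySem.Chars.strip current
      if tail = [] then parts else parts ++ [String.ofList tail]
  | c :: rest, parts, current, depth =>
      let depth' := pvStepD depth c
      if depth' = 0 ∧ PySem.Chars.startswith (c :: rest) pvSep then
        let fragment := PySem.Chars.strip current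
        let parts' := if fragment = [] then parts else parts ++ [String.ofList fragment]
        pvA_loop ((c :: rest).drop 5) parts' [] depth'
      else
        pvA_loop rest parts (current ++ [c]) depth'
  termination_by l _ _ _ => l.length
  decreasing_by all_goals (simp; try omega)

def split_top_level_items (text : String) : List String :=
  if PySem.Str.count text "(" < 2 then
    if PySem.Str.strip text = "" then [] else [PySem.Str.strip text]
  else
    pvA_loop text.toList [] [] 0

-- ===== PORT B =====
-- depth after scanning one piece (B's inner for-loop over the characters of a piece)
def pvPieceDepth (depth : Nat) (piece : List Char) : Nat :=
  piece.foldl pvStepD depth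

-- B's for-loop over the pieces of text.split(" and "); chunk holds the pending pieces,
-- re-joined with " and " at flush time
def pvB_loop : List (List Char) → List String → List (List Char) → Nat → List String
  | [], parts, chunk, _ =>
      if chunk = [] then parts
      else
        let tail := PySem.Chars.strip (PySem.Chars.join pvSep chunk)
        if tail = [] then parts else parts ++ [String.ofList tail]
  | piece :: rest, parts, chunk, depth =>
      let chunk' := chunk ++ [piece]
      let depth' := pvPieceDepth depth piece
      if depth' = 0 then
        let fragment := PySem.Chars.strip (PySem.Chars.join pvSep chunk')
        let parts' := if fragment = [] then parts else parts ++ [String.ofList fragment]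
        pvB_loop rest parts' [] depth'
      else
        pvB_loop rest parts chunk' depth'

def split_top_level_items_alt (text : String) : List String :=
  if PySem.Str.count text "(" < 2 then
    if PySem.Str.strip text = "" then [] else [PySem.Str.strip text]
  else
    pvB_loop (PySem.Chars.splitOn text.toList pvSep) [] [] 0

-- ===== PRECONDITION & SPEC =====
def Spec_split_top_level_items (text : String) (out : List String) : Prop := out = split_top_level_items_alt text
instance (text : String) (out : List String) : Decidable (Spec_split_top_level_items text out) := by unfold Spec_split_top_level_items; infer_instance

-- ===== CLAIM (what is proved, stated in full; the proofs are below) =====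
def Claim_equal_split_top_level_items : Prop := ∀ (text : String), Dom_split_top_level_items text → Spec_split_top_level_items text (split_top_level_items text)

-- ===== LEMMAS AND PROOFS =====

-- proof-layer reference splitter: a clean structural recursion computing text.split(" and ")
def pvConsHead (c : Char) : List (List Char) → List (List Char)
  | [] => [[c]]
  | p :: ps => (c :: p) :: ps

def pvMySplit : List Char → List (List Char)
  | [] => [[]]
  | c :: rest =>
      if pvSep.isPrefixOf (c :: rest) then
        [] :: pvMySplit ((c :: rest).drop 5)
      else
        pvConsHead c (pvMySplit rest)
  termination_by l => l.length
  decreasing_by all_goals (simp; try omega)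

lemma pvMySplit_nil : pvMySplit [] = [[]] := by simp [pvMySplit]

lemma pvMySplit_cons_pos {c : Char} {rest : List Char} (hp : pvSep.isPrefixOf (c :: rest)) :
    pvMySplit (c :: rest) = [] :: pvMySplit ((c :: rest).drop 5) := by
  rw [pvMySplit]; simp [hp]

lemma pvMySplit_cons_neg {c : Char} {rest : List Char} (hp : ¬ pvSep.isPrefixOf (c :: rest)) :
    pvMySplit (c :: rest) = pvConsHead c (pvMySplit rest) := by
  rw [pvMySplit]; simp [hp]

lemma pvMySplit_ne_nil (l : List Char) : pvMySplit l ≠ [] := by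
  fun_induction pvMySplit l with
  | case1 => simp
  | case2 c rest h ih => simp
  | case3 c rest h ih => cases hms : pvMySplit rest <;> simp [pvConsHead]

lemma pvMySplit_destruct (l : List Char) : ∃ q qs, pvMySplit l = q :: qs := by
  cases hms : pvMySplit l with
  | nil => exact absurd hms (pvMySplit_ne_nil l)
  | cons q qs => exact ⟨q, qs, rfl⟩

-- flush helper used only in the proofs (both ports inline the same code)
def pvFlush (parts : List String) (buf : List Char) : List String :=
  let fragment := PySem.Chars.strip buf
  if fragment = [] then parts else parts ++ [String.ofList fragment]

-- intermediate loop: B's merge phase expressed over one explicit character buffer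
def pvBgo : List (List Char) → List String → List Char → Nat → List String
  | [], parts, cur, _ => pvFlush parts cur
  | p :: ps, parts, cur, depth =>
      let buf := cur ++ p
      let depth' := pvPieceDepth depth p
      if depth' = 0 then pvBgo ps (pvFlush parts buf) [] 0
      else
        match ps with
        | [] => pvFlush parts buf
        | _ :: _ => pvBgo ps parts (buf ++ pvSep) depth'

lemma pvStrip_nil : PySem.Chars.strip ([] : List Char) = [] := by decide

-- PySem's splitOn.go (Python str.split) computes pvMySplit
lemma pv_go_eq (fuel : Nat) : ∀ (l cur : List Char) (acc : List (List Char)), l.length < fuel →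
    PySem.Chars.splitOn.go pvSep fuel l cur acc =
      acc.reverse ++ (match pvMySplit l with
        | [] => [cur.reverse]
        | p :: ps => (cur.reverse ++ p) :: ps) := by
  induction fuel with
  | zero => intro l cur acc h; omega
  | succ fuel ih =>
    intro l cur acc h
    cases l with
    | nil => simp [PySem.Chars.splitOn.go, pvMySplit_nil]
    | cons c rest =>
      rw [PySem.Chars.splitOn.go]
      simp only [List.length_cons] at h
      by_cases hp : pvSep.isPrefixOf (c :: rest)
      · rw [if_pos hp]
        have h5 : pvSep.length = 5 := by decide
        have hlen : ((c :: rest).drop pvSep.length).length < fuel := by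
          rw [h5]; simp only [List.length_drop, List.length_cons]; omega
        rw [ih _ _ _ hlen]
        obtain ⟨q, qs, hq⟩ := pvMySplit_destruct (List.drop 4 rest)
        have hq5 : pvMySplit (List.drop pvSep.length (c :: rest)) = q :: qs := by
          simpa using hq
        rw [pvMySplit_cons_pos hp]
        have hq5' : pvMySplit (List.drop 5 (c :: rest)) = q :: qs := by simpa using hq
        rw [hq5, hq5']
        simp
      · rw [if_neg hp]
        have hlen : rest.length < fuel := by omega
        rw [ih _ _ _ hlen]
        obtain ⟨q, qs, hq⟩ := pvMySplit_destruct rest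
        rw [pvMySplit_cons_neg hp, hq]
        simp [pvConsHead]

lemma pv_splitOn_eq (l : List Char) : PySem.Chars.splitOn l pvSep = pvMySplit l := by
  rw [PySem.Chars.splitOn, pv_go_eq (l.length + 1) l [] [] (by omega)]
  obtain ⟨q, qs, hq⟩ := pvMySplit_destruct l
  rw [hq]
  simp

-- A's character loop computes the piece-merge loop over pvMySplit
lemma pvA_eq_Bgo (l : List Char) : ∀ (parts : List String) (cur : List Char) (d : Nat),
    pvA_loop l parts cur d = pvBgo (pvMySplit l) parts cur d := by
  fun_induction pvMySplit l with
  | case1 =>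
      intro parts cur d
      rw [pvA_loop]
      by_cases hd : d = 0
      · subst hd; simp [pvBgo, pvPieceDepth, pvFlush, pvStrip_nil]
      · simp [pvBgo, pvPieceDepth, pvFlush, hd]
  | case2 c rest hp ih =>
      intro parts cur d
      obtain ⟨t, ht⟩ : ∃ t, c :: rest = pvSep ++ t := by
        obtain ⟨t, ht⟩ := List.isPrefixOf_iff_prefix.mp hp
        exact ⟨t, ht.symm⟩
      have hc : c = ' ' := by simpa [pvSep] using congrArg (fun l => l.headD 'x') ht
      subst hc
      have hrest : rest = 'a' :: 'n' :: 'd' :: ' ' :: t := by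
        simpa [pvSep] using congrArg List.tail ht
      subst hrest
      have hdrop : List.drop 5 (' ' :: 'a' :: 'n' :: 'd' :: ' ' :: t) = t := by simp
      rw [hdrop] at ih ⊢
      obtain ⟨q, qs, hq⟩ := pvMySplit_destruct t
      by_cases hd : d = 0
      · subst hd
        rw [pvA_loop, if_pos ⟨by simp [pvStepD], by simpa [PySem.Chars.startswith] using hp⟩]
        rw [hdrop, ih, hq]
        simp [pvBgo, pvPieceDepth, pvFlush, pvStepD]
      · rw [pvA_loop, if_neg (by simp [pvStepD, hd])]
        rw [pvA_loop, if_neg (by simp [pvStepD, hd])]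
        rw [pvA_loop, if_neg (by simp [pvStepD, hd])]
        rw [pvA_loop, if_neg (by simp [pvStepD, hd])]
        rw [pvA_loop, if_neg (by simp [pvStepD, hd])]
        rw [ih, hq]
        simp [pvBgo, pvPieceDepth, pvStepD, hd, pvSep]
  | case3 c rest hp ih =>
      intro parts cur d
      rw [pvA_loop,
        if_neg (fun hcontra => hp (by simpa [PySem.Chars.startswith] using hcontra.2)), ih]
      obtain ⟨q, qs, hq⟩ := pvMySplit_destruct rest
      rw [hq]
      simp [pvConsHead, pvBgo, pvPieceDepth]

-- join of a chunk extended by one more piece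
lemma pv_join_snoc (chunk : List (List Char)) (p : List Char) (h : chunk ≠ []) :
    PySem.Chars.join pvSep (chunk ++ [p]) = PySem.Chars.join pvSep chunk ++ pvSep ++ p := by
  induction chunk with
  | nil => exact absurd rfl h
  | cons a chunk ih =>
      cases chunk with
      | nil => simp [PySem.Chars.join_cons_cons, PySem.Chars.join_singleton]
      | cons b chunk' =>
          simp only [List.cons_append]
          rw [PySem.Chars.join_cons_cons, ← List.cons_append, ih (by simp),
            PySem.Chars.join_cons_cons]
          simp

-- B's chunk-list loop is the buffer loop
lemma pvB_eq_Bgo (ps : List (List Char)) : ∀ (parts : List String) (d : Nat),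
    (pvB_loop ps parts [] d = pvBgo ps parts [] d) ∧
    (∀ chunk, chunk ≠ [] → ps ≠ [] →
      pvB_loop ps parts chunk d = pvBgo ps parts (PySem.Chars.join pvSep chunk ++ pvSep) d) := by
  induction ps with
  | nil =>
      intro parts d
      exact ⟨by simp [pvB_loop, pvBgo, pvFlush, pvStrip_nil],
        fun chunk hch hps => absurd rfl hps⟩
  | cons p rest ih =>
      intro parts d
      constructor
      · by_cases hd : pvPieceDepth d p = 0
        · simp only [pvB_loop, pvBgo, List.nil_append, hd,
            PySem.Chars.join_singleton, pvFlush]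
          exact (ih _ _).1
        · cases rest with
          | nil => simp [pvB_loop, pvBgo, hd, PySem.Chars.join_singleton, pvFlush]
          | cons r rs =>
              have h2 := (ih parts (pvPieceDepth d p)).2 [p] (by simp) (by simp)
              rw [PySem.Chars.join_singleton] at h2
              have hL : pvB_loop (p :: r :: rs) parts [] d
                  = pvB_loop (r :: rs) parts [p] (pvPieceDepth d p) := by
                simp [pvB_loop, hd]
              have hR : pvBgo (p :: r :: rs) parts [] d
                  = pvBgo (r :: rs) parts (p ++ pvSep) (pvPieceDepth d p) := by
                simp [pvBgo, hd]
              rw [hL, hR]; exact h2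
      · intro chunk hch _
        have hjoin := pv_join_snoc chunk p hch
        by_cases hd : pvPieceDepth d p = 0
        · simp only [pvB_loop, pvBgo, hd, hjoin, pvFlush]
          rw [(ih _ _).1]
          simp
        · cases rest with
          | nil => simp [pvB_loop, pvBgo, hd, pvFlush, hjoin]
          | cons r rs =>
              have h2 := (ih parts (pvPieceDepth d p)).2 (chunk ++ [p]) (by simp) (by simp)
              rw [hjoin] at h2
              have hL : pvB_loop (p :: r :: rs) parts chunk d
                  = pvB_loop (r :: rs) parts (chunk ++ [p]) (pvPieceDepth d p) := by
                simp [pvB_loop, hd]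
              have hR : pvBgo (p :: r :: rs) parts (PySem.Chars.join pvSep chunk ++ pvSep) d
                  = pvBgo (r :: rs) parts (PySem.Chars.join pvSep chunk ++ pvSep ++ p ++ pvSep)
                      (pvPieceDepth d p) := by
                simp [pvBgo, hd]
              rw [hL, hR]; exact h2

-- ===== VERDICT (by name: the statement is the Claim_ definition above) =====
theorem split_top_level_items_spec : Claim_equal_split_top_level_items := by
  intro text _
  unfold Spec_split_top_level_items split_top_level_items split_top_level_items_alt
  by_cases h : PySem.Str.count text "(" < 2
  · rw [if_pos h, if_pos h]
  · rw [if_neg h, if_neg h, pv_splitOn_eq, pvA_eq_Bgo, (pvB_eq_Bgo _ _ _).1]
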